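-- pv_equiv track=rewrite | github.com/JWang169/Leetcode | Python/ladder476.py | getRangeSum
-- ===== SOURCE A (Python) =====
-- def getRangeSum(A):
--     n = len(A)
--     rangeSum = [[0] * n for _ in range(n)]
--     # rangeSum[i][j] : sum(A[i: j + 1])
--     for i in range(n):
--         rangeSum[i][i] = A[i]
--         for j in range(i + 1, n):
--             rangeSum[i][j] = rangeSum[i][j - 1] + A[j]
--     return rangeSum
-- ===== SOURCE B (Python) =====
-- def getRangeSum(A):
--     n = len(A)
--     prefix = [0]
--     total = 0
--     for a in A:
--         total += a
--         prefix.append(total)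
--     return [[prefix[j + 1] - prefix[i] if j >= i else 0 for j in range(n)]
--             for i in range(n)]
-- ===== Notes on version B (the rewrite author's own statement) =====
-- stated objective: alternative
-- what changed: B precomputes one prefix-sum array and fills every cell by closed-form differencing prefix[j+1]-prefix[i], replacing A's per-row running-accumulator DP that derives each cell from its left neighbour.
import Mathlib
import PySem

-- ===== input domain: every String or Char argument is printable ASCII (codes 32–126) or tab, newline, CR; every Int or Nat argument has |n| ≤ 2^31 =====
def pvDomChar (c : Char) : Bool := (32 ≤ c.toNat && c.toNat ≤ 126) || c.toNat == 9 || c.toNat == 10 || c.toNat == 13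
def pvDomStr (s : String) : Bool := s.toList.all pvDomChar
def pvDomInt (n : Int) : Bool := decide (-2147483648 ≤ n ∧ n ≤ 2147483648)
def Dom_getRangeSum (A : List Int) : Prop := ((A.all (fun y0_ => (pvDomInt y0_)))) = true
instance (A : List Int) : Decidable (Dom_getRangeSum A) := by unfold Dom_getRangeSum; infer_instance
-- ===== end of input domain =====

-- B replaces A's per-row running-accumulator fill with one prefix-sum table plus
-- closed-form differencing prefix[j+1]-prefix[i]; same O(n^2) output, alternative decomposition.

-- ===== PORT A =====
-- literal port of A: outer loop over i sets rangeSum[i][i] = A[i], inner loop over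
-- j in range(i+1,n) sets rangeSum[i][j] = rangeSum[i][j-1] + A[j]; list mutation is
-- modelled by List.set / List.getD on the matrix of rows.
def getRangeSum (A : List Int) : List (List Int) :=
  let n := A.length
  let m0 : List (List Int) := (List.range n).map (fun _ => List.replicate n 0)
  (List.range n).foldl (fun m i =>
    let m1 := m.set i ((m.getD i []).set i (A.getD i 0))
    (List.range' (i+1) (n - (i+1))).foldl (fun m2 j =>
      m2.set i ((m2.getD i []).set j ((m2.getD i []).getD (j-1) 0 + A.getD j 0))) m1) m0

-- ===== PORT B =====
-- literal port of B: one pass building the prefix-sum list, then a double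
-- comprehension filling each cell by differencing.
def getRangeSum_alt (A : List Int) : List (List Int) :=
  let pre := (A.foldl (fun ps a => (ps.1 ++ [ps.2 + a], ps.2 + a)) (([0] : List Int), (0 : Int))).1
  let n := A.length
  (List.range n).map (fun i => (List.range n).map (fun j =>
    if i ≤ j then pre.getD (j+1) 0 - pre.getD i 0 else 0))

-- ===== PRECONDITION & SPEC =====
def Spec_getRangeSum (A : List Int) (out : List (List Int)) : Prop := out = getRangeSum_alt A
instance (A : List Int) (out : List (List Int)) : Decidable (Spec_getRangeSum A out) := by unfold Spec_getRangeSum; infer_instance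

-- ===== CLAIM (what is proved, stated in full; the proofs are below) =====
def Claim_equal_getRangeSum : Prop := ∀ (A : List Int), Dom_getRangeSum A → Spec_getRangeSum A (getRangeSum A)

-- ===== LEMMAS AND PROOFS =====

-- prefix sum of the first k elements
def pvS (A : List Int) (k : Nat) : Int := (A.take k).sum

-- the common canonical matrix both ports compute
def pvCanon (A : List Int) : List (List Int) :=
  (List.range A.length).map (fun i => (List.range A.length).map (fun j =>
    if i ≤ j then pvS A (j+1) - pvS A i else 0))

theorem pvS_succ (A : List Int) (j : Nat) (h : j < A.length) :
    pvS A (j+1) = pvS A j + A.getD j 0 := by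
  rw [pvS, pvS, List.sum_take_succ _ _ h, List.getD_eq_getElem _ _ h]

theorem getD_map_range {α : Type} [Inhabited α] (f : Nat → α) (n j : Nat) (d : α) (h : j < n) :
    (((List.range n).map f).getD j d) = f j := by
  rw [List.getD_eq_getElem _ _ (by simpa using h)]
  simp

-- B's prefix fold computes the prefix sums, generalized over the accumulator
theorem prefix_fold (A : List Int) : ∀ (P : List Int) (s : Int),
    A.foldl (fun ps a => (ps.1 ++ [ps.2 + a], ps.2 + a)) (P, s)
      = (P ++ (List.range A.length).map (fun k => s + (A.take (k+1)).sum), s + A.sum) := by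
  induction A with
  | nil => intro P s; simp
  | cons a A ih =>
    intro P s
    simp only [List.foldl_cons, ih]
    refine Prod.ext ?_ (by simp; ring)
    simp only [List.length_cons, List.range_succ_eq_map, List.map_cons, List.map_map]
    simp only [List.append_assoc, List.singleton_append, List.take_succ_cons,
      List.take_zero, List.sum_cons, List.sum_nil, Function.comp_def]
    congr 2
    · simp
    · apply List.map_congr_left
      intro k _; simp; ring

theorem prefix_list (A : List Int) :
    (A.foldl (fun ps a => (ps.1 ++ [ps.2 + a], ps.2 + a)) (([0] : List Int), (0 : Int))).1
      = (List.range (A.length + 1)).map (fun k => pvS A k) := by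
  rw [prefix_fold]
  simp only [List.range_succ_eq_map, List.map_cons, List.map_map]
  simp only [Function.comp_def, pvS, List.take_zero, List.sum_nil,
    List.singleton_append]
  congr 1
  apply List.map_congr_left
  intro k _; simp

theorem alt_eq_canon (A : List Int) : getRangeSum_alt A = pvCanon A := by
  unfold getRangeSum_alt pvCanon
  simp only [prefix_list]
  apply List.map_congr_left
  intro i hi
  apply List.map_congr_left
  intro j hj
  rw [List.mem_range] at hi hj
  rw [getD_map_range _ _ _ _ (by omega), getD_map_range _ _ _ _ (by omega)]

-- lifting a fold that only touches row i of the matrix to a fold on that row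
theorem set_get_fold (L : List Nat) (i : Nat) (g : Nat → List Int → List Int) :
    ∀ (m : List (List Int)), i < m.length →
    L.foldl (fun m2 j => m2.set i (g j (m2.getD i []))) m
      = m.set i (L.foldl (fun r j => g j r) (m.getD i [])) := by
  induction L with
  | nil =>
    intro m hm
    simp only [List.foldl_nil]
    rw [List.getD_eq_getElem _ _ hm, List.set_getElem_self]
  | cons a L ih =>
    intro m hm
    simp only [List.foldl_cons]
    rw [ih _ (by simpa using hm), List.set_set]
    congr 2
    rw [List.getD_eq_getElem _ _ (by simpa using hm), List.getElem_set_self]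

-- the final content of row i (as produced by the inner loop from a zero row)
def pvRowA (A : List Int) (i : Nat) : List Int :=
  (List.range' (i+1) (A.length - (i+1))).foldl
    (fun r j => r.set j (r.getD (j-1) 0 + A.getD j 0))
    ((List.replicate A.length 0).set i (A.getD i 0))

-- invariant of the inner loop
theorem inner_fold (A : List Int) (i : Nat) (hi : i < A.length) :
    ∀ (t : Nat), t ≤ A.length - (i+1) →
    (List.range' (i+1) t).foldl (fun r j => r.set j (r.getD (j-1) 0 + A.getD j 0))
        ((List.replicate A.length 0).set i (A.getD i 0))
      = (List.range A.length).map (fun j =>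
          if i ≤ j ∧ j < i + 1 + t then pvS A (j+1) - pvS A i else 0) := by
  intro t
  induction t with
  | zero =>
    intro _
    simp only [List.range'_zero, List.foldl_nil]
    apply List.ext_getElem (by simp)
    intro j h1 h2
    simp only [List.length_set, List.length_replicate] at h1
    rw [List.getElem_set]
    simp only [List.getElem_map, List.getElem_range, List.getElem_replicate]
    by_cases hji : i = j
    · subst hji
      rw [if_pos rfl, if_pos (by omega), pvS_succ A i hi]
      ring
    · rw [if_neg hji, if_neg (by omega)]
  | succ t ih =>
    intro ht
    rw [List.range'_1_concat, List.foldl_append, ih (by omega)]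
    simp only [List.foldl_cons, List.foldl_nil]
    have hjn : i + 1 + t < A.length := by omega
    apply List.ext_getElem (by simp)
    intro j h1 h2
    simp only [List.length_set, List.length_map, List.length_range] at h1
    rw [List.getElem_set]
    simp only [List.getElem_map, List.getElem_range]
    by_cases hj : i + 1 + t = j
    · subst hj
      rw [getD_map_range _ _ _ _ (show i + 1 + t - 1 < A.length by omega)]
      have h1' : i ≤ i + 1 + t - 1 ∧ i + 1 + t - 1 < i + 1 + t := by omega
      have h2' : i ≤ i + 1 + t ∧ i + 1 + t < i + 1 + (t+1) := by omega
      simp only [h1', h2', and_self, if_true]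
      have : i + 1 + t - 1 + 1 = i + 1 + t := by omega
      rw [this, pvS_succ A (i+1+t) hjn]
      ring
    · simp only [hj, if_false]
      by_cases hle : i ≤ j ∧ j < i + 1 + t
      · have : i ≤ j ∧ j < i + 1 + (t+1) := by omega
        simp [hle, this]
      · have : ¬ (i ≤ j ∧ j < i + 1 + (t+1)) := by omega
        simp [hle, this]

theorem rowA_eq (A : List Int) (i : Nat) (hi : i < A.length) :
    pvRowA A i = (List.range A.length).map (fun j =>
      if i ≤ j then pvS A (j+1) - pvS A i else 0) := by
  unfold pvRowA
  rw [inner_fold A i hi (A.length - (i+1)) le_rfl]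
  apply List.map_congr_left
  intro j hj
  rw [List.mem_range] at hj
  have : (i ≤ j ∧ j < i + 1 + (A.length - (i+1))) ↔ i ≤ j := by omega
  simp only [this]

-- the outer loop fills the rows one by one
theorem outer_fold (A : List Int) :
    ∀ (k : Nat), k ≤ A.length →
    (List.range k).foldl (fun m i =>
        (List.range' (i+1) (A.length - (i+1))).foldl (fun m2 j =>
          m2.set i ((m2.getD i []).set j ((m2.getD i []).getD (j-1) 0 + A.getD j 0)))
          (m.set i ((m.getD i []).set i (A.getD i 0))))
        ((List.range A.length).map (fun _ => List.replicate A.length 0))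
      = (List.range A.length).map (fun p =>
          if p < k then pvRowA A p else List.replicate A.length 0) := by
  intro k
  induction k with
  | zero => intro _; simp
  | succ k ih =>
    intro hk
    rw [List.range_succ, List.foldl_append, ih (by omega)]
    simp only [List.foldl_cons, List.foldl_nil]
    have hk' : k < A.length := by omega
    set M := (List.range A.length).map
      (fun p => if p < k then pvRowA A p else List.replicate A.length 0) with hM
    have hlen : M.length = A.length := by simp [hM]
    have hgd : M.getD k [] = List.replicate A.length 0 := by
      rw [hM, getD_map_range _ _ _ _ hk']
      simp
    rw [set_get_fold _ k (fun j r => r.set j (r.getD (j-1) 0 + A.getD j 0)) _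
      (by rw [List.length_set, hlen]; exact hk')]
    have hget : (M.set k ((M.getD k []).set k (A.getD k 0))).getD k []
        = (M.getD k []).set k (A.getD k 0) := by
      rw [List.getD_eq_getElem _ _ (by rw [List.length_set, hlen]; exact hk'),
        List.getElem_set_self]
    rw [hget, List.set_set, hgd]
    apply List.ext_getElem (by simp [hlen])
    intro p h1 h2
    rw [List.getElem_set]
    simp only [hM, List.getElem_map, List.getElem_range]
    rw [List.length_set, hlen] at h1
    by_cases hp : k = p
    · subst hp
      rw [if_pos rfl, if_pos (by omega)]
      rfl
    · rw [if_neg hp]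
      by_cases hpk : p < k
      · rw [if_pos hpk, if_pos (by omega)]
      · rw [if_neg hpk, if_neg (by omega)]

theorem a_eq_canon (A : List Int) : getRangeSum A = pvCanon A := by
  unfold getRangeSum pvCanon
  simp only []
  rw [outer_fold A A.length le_rfl]
  apply List.map_congr_left
  intro i hi
  rw [List.mem_range] at hi
  rw [if_pos hi, rowA_eq A i hi]

-- ===== VERDICT (by name: the statement is the Claim_ definition above) =====
theorem getRangeSum_spec : Claim_equal_getRangeSum := by
  intro A _
  unfold Spec_getRangeSum
  rw [a_eq_canon, alt_eq_canon]
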